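-- pv_equiv track=rewrite | github.com/BIGSHOL/boardgame | backend/app/services/blueprint_service.py | _evaluate_all_connected
-- ===== SOURCE A (Python) =====
-- def _evaluate_all_connected(board: list[list[dict]], player_id: int, bonus: int) -> int:
--     """Check if all player tiles are connected."""
--     player_positions = []
--     for row_idx, row in enumerate(board):
--         for col_idx, cell in enumerate(row):
--             if cell.get("tile") and cell["tile"].get("owner_id") == player_id:
--                 player_positions.append((row_idx, col_idx))
--
--     if len(player_positions) <= 1:
--         return bonus  # 0 or 1 tile is trivially connected
--
--     # BFS to check connectivity
--     visited = {player_positions[0]}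
--     queue = [player_positions[0]]
--     position_set = set(player_positions)
--
--     while queue:
--         r, c = queue.pop(0)
--         for dr, dc in [(-1, 0), (1, 0), (0, -1), (0, 1)]:
--             nr, nc = r + dr, c + dc
--             if (nr, nc) in position_set and (nr, nc) not in visited:
--                 visited.add((nr, nc))
--                 queue.append((nr, nc))
--
--     return bonus if len(visited) == len(player_positions) else 0
-- ===== SOURCE B (Python) =====
-- def _evaluate_all_connected(board: list[list[dict]], player_id: int, bonus: int) -> int:
--     """Check if all player tiles are connected (round-based saturation instead of BFS)."""
--     player_positions = [
--         (r, c)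
--         for r, row in enumerate(board)
--         for c, cell in enumerate(row)
--         if cell.get("tile") and cell["tile"].get("owner_id") == player_id
--     ]
--     if len(player_positions) <= 1:
--         return bonus
--
--     start = player_positions[0]
--     component = {start}
--     remaining = [p for p in player_positions if p != start]
--     changed = True
--     while changed:
--         changed = False
--         still = []
--         for (r, c) in remaining:
--             if (r - 1, c) in component or (r + 1, c) in component \
--                     or (r, c - 1) in component or (r, c + 1) in component:
--                 component.add((r, c))
--                 changed = True
--             else:
--                 still.append((r, c))
--         remaining = still
--     return bonus if not remaining else 0
-- ===== Notes on version B (the rewrite author's own statement) =====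
-- stated objective: alternative
-- what changed: A's single-source BFS with a FIFO queue and a visited-count comparison is replaced by round-based saturation: repeatedly sweep a remaining list and move every tile adjacent to the growing component into it until a full pass changes nothing, then test whether the remaining list is empty.
import Mathlib
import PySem

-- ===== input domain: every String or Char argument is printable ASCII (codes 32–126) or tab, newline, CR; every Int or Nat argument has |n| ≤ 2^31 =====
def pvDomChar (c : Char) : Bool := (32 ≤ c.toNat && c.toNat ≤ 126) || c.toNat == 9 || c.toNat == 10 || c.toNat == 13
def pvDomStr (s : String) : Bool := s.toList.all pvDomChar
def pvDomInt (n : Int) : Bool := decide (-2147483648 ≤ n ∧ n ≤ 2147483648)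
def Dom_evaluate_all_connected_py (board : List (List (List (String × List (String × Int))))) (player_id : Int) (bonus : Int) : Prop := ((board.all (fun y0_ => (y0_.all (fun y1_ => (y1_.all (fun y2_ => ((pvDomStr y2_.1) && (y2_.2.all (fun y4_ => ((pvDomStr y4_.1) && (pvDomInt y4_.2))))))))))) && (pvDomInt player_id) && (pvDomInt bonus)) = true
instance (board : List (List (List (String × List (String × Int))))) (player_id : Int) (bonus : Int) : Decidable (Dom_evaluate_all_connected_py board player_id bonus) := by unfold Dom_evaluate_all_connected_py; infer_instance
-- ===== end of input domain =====

-- B replaces A's BFS (queue, visited set, count comparison) by round-based saturation: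
-- repeatedly move tiles adjacent to the component from a remaining list into the component
-- until a full pass changes nothing, then test whether the remaining list is empty (objective: alternative).

-- ===== PORT A =====
-- shared by both ports: the tile-ownership test and the position-collection loop,
-- which the two Pythons perform identically
def pvIsPlayer (cell : List (String × List (String × Int))) (pid : Int) : Bool :=
  match (PySem.Dict.mk cell).get? "tile" with
  | none => false
  | some t =>
    if t.isEmpty then false
    else
      match (PySem.Dict.mk t).get? "owner_id" with
      | none => false
      | some v => v == pid

def pvPositions (board : List (List (List (String × List (String × Int))))) (pid : Int) :
    List (Int × Int) :=
  (PySem.List.enumerate board 0).foldl (fun acc rp =>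
    (PySem.List.enumerate rp.2 0).foldl (fun acc2 cp =>
      if pvIsPlayer cp.2 pid then acc2 ++ [(rp.1, cp.1)] else acc2) acc) []

def pvDirs : List (Int × Int) := [(-1, 0), (1, 0), (0, -1), (0, 1)]

-- one neighbour test of A's inner `for dr, dc` loop
def pvTry (pset : List (Int × Int)) (st : List (Int × Int) × List (Int × Int)) (n : Int × Int) :
    List (Int × Int) × List (Int × Int) :=
  if n ∈ pset ∧ n ∉ st.1 then (st.1 ++ [n], st.2 ++ [n]) else st

def pvStep (pset : List (Int × Int)) (v q : List (Int × Int)) (r c : Int) :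
    List (Int × Int) × List (Int × Int) :=
  pvDirs.foldl (fun st d => pvTry pset st (r + d.1, c + d.2)) (v, q)

def pvMu (pset v q : List (Int × Int)) : Nat :=
  2 * (pset.filter (fun x => decide (x ∉ v))).length + q.length

theorem pvFilterLen_mono (pset v : List (Int × Int)) (n : Int × Int) :
    (pset.filter (fun x => decide (x ∉ v ++ [n]))).length ≤
      (pset.filter (fun x => decide (x ∉ v))).length := by
  apply List.Sublist.length_le
  apply List.monotone_filter_right
  intro a ha
  simp only [decide_eq_true_eq] at *
  exact fun hv => ha (List.mem_append_left _ hv)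

theorem pvFilterLen_lt (pset v : List (Int × Int)) (n : Int × Int)
    (hmem : n ∈ pset) (hnv : n ∉ v) :
    (pset.filter (fun x => decide (x ∉ v ++ [n]))).length <
      (pset.filter (fun x => decide (x ∉ v))).length := by
  induction pset with
  | nil => cases hmem
  | cons a t ih =>
    rw [List.filter_cons, List.filter_cons]
    by_cases han : a = n
    · subst han
      have h1 : decide (a ∉ v ++ [a]) = false := by simp
      have h2 : decide (a ∉ v) = true := by simp [hnv]
      rw [h1, h2]
      have := pvFilterLen_mono t v a
      simp only [Bool.false_eq_true, if_false, if_true, List.length_cons]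
      omega
    · have hnt : n ∈ t := by cases hmem with
        | head => exact absurd rfl han
        | tail _ h => exact h
      have hlt := ih hnt
      by_cases hav : a ∈ v
      · have h1 : decide (a ∉ v ++ [n]) = false := by simp [hav]
        have h2 : decide (a ∉ v) = false := by simp [hav]
        rw [h1, h2]; exact hlt
      · have h1 : decide (a ∉ v ++ [n]) = true := by simp [hav, han]
        have h2 : decide (a ∉ v) = true := by simp [hav]
        rw [h1, h2]
        simp only [if_true, List.length_cons]
        omega

theorem pvTry_mu (pset : List (Int × Int)) (st : List (Int × Int) × List (Int × Int))
    (n : Int × Int) :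
    pvMu pset (pvTry pset st n).1 (pvTry pset st n).2 ≤ pvMu pset st.1 st.2 := by
  unfold pvTry
  split
  · next h =>
    have := pvFilterLen_lt pset st.1 n h.1 h.2
    simp only [pvMu, List.length_append, List.length_cons, List.length_nil]
    omega
  · exact le_refl _

theorem pvFold_mu (pset : List (Int × Int)) (r c : Int) :
    ∀ (ds : List (Int × Int)) (st : List (Int × Int) × List (Int × Int)),
      pvMu pset (ds.foldl (fun st d => pvTry pset st (r + d.1, c + d.2)) st).1
        (ds.foldl (fun st d => pvTry pset st (r + d.1, c + d.2)) st).2 ≤ pvMu pset st.1 st.2 := by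
  intro ds
  induction ds with
  | nil => intro st; exact le_refl _
  | cons d t ih =>
    intro st
    simp only [List.foldl_cons]
    exact le_trans (ih _) (pvTry_mu pset st _)

def pvBFS (pset : List (Int × Int)) : List (Int × Int) → List (Int × Int) → List (Int × Int)
  | v, [] => v
  | v, p :: q =>
    let st := pvStep pset v q p.1 p.2
    pvBFS pset st.1 st.2
termination_by v q => pvMu pset v q
decreasing_by
  have h := pvFold_mu pset p.1 p.2 pvDirs (v, q)
  simp only [pvStep] at *
  simp only [pvMu, List.length_cons] at *
  omega

def evaluate_all_connected_py (board : List (List (List (String × List (String × Int))))) (player_id : Int) (bonus : Int) : Int :=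
  let player_positions := pvPositions board player_id
  if player_positions.length ≤ 1 then bonus
  else
    match player_positions with
    | [] => bonus  -- unreachable: length ≥ 2
    | p0 :: _ =>
      let position_set := PySem.Set.ofList player_positions
      let visited := pvBFS position_set [p0] [p0]
      if visited.length = player_positions.length then bonus else 0

-- ===== PORT B =====
-- one element of B's pass over `remaining`; state = (component, changed, still)
def pvPassStep (st : List (Int × Int) × Bool × List (Int × Int)) (p : Int × Int) :
    List (Int × Int) × Bool × List (Int × Int) :=
  if (p.1 - 1, p.2) ∈ st.1 ∨ (p.1 + 1, p.2) ∈ st.1 ∨ (p.1, p.2 - 1) ∈ st.1 ∨ (p.1, p.2 + 1) ∈ st.1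
  then (PySem.Set.add st.1 p, true, st.2.2)
  else (st.1, st.2.1, st.2.2 ++ [p])

theorem pvPass_len_le :
    ∀ (l : List (Int × Int)) (c : List (Int × Int)) (b : Bool) (acc : List (Int × Int)),
      ((l.foldl pvPassStep (c, b, acc)).2.2).length ≤ acc.length + l.length := by
  intro l
  induction l with
  | nil => intro c b acc; simp
  | cons p t ih =>
    intro c b acc
    simp only [List.foldl_cons, pvPassStep]
    split
    · have := ih (PySem.Set.add c p) true acc
      simp only [List.length_cons]
      omega
    · have := ih c b (acc ++ [p])
      simp only [List.length_append, List.length_cons, List.length_nil] at *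
      omega

theorem pvPass_len_lt :
    ∀ (l : List (Int × Int)) (c : List (Int × Int)) (acc : List (Int × Int)),
      (l.foldl pvPassStep (c, false, acc)).2.1 = true →
      ((l.foldl pvPassStep (c, false, acc)).2.2).length < acc.length + l.length := by
  intro l
  induction l with
  | nil => intro c acc h; simp at h
  | cons p t ih =>
    intro c acc h
    simp only [List.foldl_cons, pvPassStep] at *
    split at h
    · split
      · have := pvPass_len_le t (PySem.Set.add c p) true acc
        simp only [List.length_cons]
        omega
      · next h2 => next h3 => exact absurd h3 h2
    · split
      · next h2 => next h3 => exact absurd h2 h3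
      · have := ih c (acc ++ [p]) h
        simp only [List.length_append, List.length_cons, List.length_nil] at *
        omega

def pvPass (comp remaining : List (Int × Int)) : List (Int × Int) × Bool × List (Int × Int) :=
  remaining.foldl pvPassStep (comp, false, [])

def pvSat (comp remaining : List (Int × Int)) : List (Int × Int) :=
  let st := pvPass comp remaining
  if st.2.1 = true then pvSat st.1 st.2.2 else st.2.2
termination_by remaining.length
decreasing_by
  have := pvPass_len_lt remaining comp [] (by simpa [pvPass] using (by assumption : (pvPass comp remaining).2.1 = true))
  simpa using this

def evaluate_all_connected_py_alt (board : List (List (List (String × List (String × Int))))) (player_id : Int) (bonus : Int) : Int :=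
  let player_positions := pvPositions board player_id
  if player_positions.length ≤ 1 then bonus
  else
    match player_positions with
    | [] => bonus  -- unreachable: length ≥ 2
    | p0 :: _ =>
      let remaining := pvSat [p0] (player_positions.filter (fun p => decide (p ≠ p0)))
      if remaining.isEmpty then bonus else 0

-- ===== PRECONDITION & SPEC =====
def Spec_evaluate_all_connected_py (board : List (List (List (String × List (String × Int))))) (player_id : Int) (bonus : Int) (out : Int) : Prop := out = evaluate_all_connected_py_alt board player_id bonus
instance (board : List (List (List (String × List (String × Int))))) (player_id : Int) (bonus : Int) (out : Int) : Decidable (Spec_evaluate_all_connected_py board player_id bonus out) := by unfold Spec_evaluate_all_connected_py; infer_instance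

-- ===== CLAIM (what is proved, stated in full; the proofs are below) =====
def Claim_equal_evaluate_all_connected_py : Prop := ∀ (board : List (List (List (String × List (String × Int))))) (player_id : Int) (bonus : Int), Dom_evaluate_all_connected_py board player_id bonus → Spec_evaluate_all_connected_py board player_id bonus (evaluate_all_connected_py board player_id bonus)

-- ===== LEMMAS AND PROOFS =====

-- grid adjacency, and reachability inside a tile set from a start tile
def pvAdj (a b : Int × Int) : Prop := ∃ d ∈ pvDirs, b = (a.1 + d.1, a.2 + d.2)

inductive pvReach (P : List (Int × Int)) (s : Int × Int) : (Int × Int) → Prop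
  | base : pvReach P s s
  | step {p q : Int × Int} : pvReach P s p → q ∈ P → pvAdj p q → pvReach P s q

theorem pvAdj_elts (a b : Int × Int) :
    pvAdj a b ↔ (b = (a.1 - 1, a.2) ∨ b = (a.1 + 1, a.2) ∨ b = (a.1, a.2 - 1) ∨ b = (a.1, a.2 + 1)) := by
  constructor
  · rintro ⟨d, hd, rfl⟩
    simp only [pvDirs, List.mem_cons, List.not_mem_nil, or_false] at hd
    rcases hd with rfl | rfl | rfl | rfl
    · exact Or.inl (Prod.ext_iff.mpr ⟨by omega, by omega⟩)
    · exact Or.inr (Or.inl (Prod.ext_iff.mpr ⟨by omega, by omega⟩))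
    · exact Or.inr (Or.inr (Or.inl (Prod.ext_iff.mpr ⟨by omega, by omega⟩)))
    · exact Or.inr (Or.inr (Or.inr (Prod.ext_iff.mpr ⟨by omega, by omega⟩)))
  · rintro (rfl | rfl | rfl | rfl)
    · exact ⟨(-1, 0), by simp [pvDirs], Prod.ext_iff.mpr ⟨by omega, by omega⟩⟩
    · exact ⟨(1, 0), by simp [pvDirs], Prod.ext_iff.mpr ⟨by omega, by omega⟩⟩
    · exact ⟨(0, -1), by simp [pvDirs], Prod.ext_iff.mpr ⟨by omega, by omega⟩⟩
    · exact ⟨(0, 1), by simp [pvDirs], Prod.ext_iff.mpr ⟨by omega, by omega⟩⟩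

theorem pvAdj_symm {a b : Int × Int} (h : pvAdj a b) : pvAdj b a := by
  rw [pvAdj_elts] at h
  rw [pvAdj_elts]
  rcases h with rfl | rfl | rfl | rfl
  · exact Or.inr (Or.inl (Prod.ext_iff.mpr ⟨by omega, by omega⟩))
  · exact Or.inl (Prod.ext_iff.mpr ⟨by omega, by omega⟩)
  · exact Or.inr (Or.inr (Or.inr (Prod.ext_iff.mpr ⟨by omega, by omega⟩)))
  · exact Or.inr (Or.inr (Or.inl (Prod.ext_iff.mpr ⟨by omega, by omega⟩)))

theorem pvReach_mem {P : List (Int × Int)} {s x : Int × Int} (hs : s ∈ P)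
    (h : pvReach P s x) : x ∈ P := by
  induction h with
  | base => exact hs
  | step _ hq _ _ => exact hq

theorem pvReach_subset_closed {P : List (Int × Int)} {s : Int × Int} {v : List (Int × Int)}
    (hcl : ∀ p ∈ v, ∀ n ∈ P, pvAdj p n → n ∈ v) (hs : s ∈ v) :
    ∀ x, pvReach P s x → x ∈ v := by
  intro x h
  induction h with
  | base => exact hs
  | step _ hq hadj ih => exact hcl _ ih _ hq hadj

-- ---------- A side: BFS computes the reachable set ----------

def pvInv (pset : List (Int × Int)) (s : Int × Int) (v q : List (Int × Int)) : Prop :=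
  v.Nodup ∧ (∀ x ∈ q, x ∈ v) ∧ (∀ x ∈ v, x ∈ pset) ∧ s ∈ v ∧
  (∀ x ∈ v, pvReach pset s x) ∧
  (∀ p ∈ v, p ∉ q → ∀ n ∈ pset, pvAdj p n → n ∈ v)

-- one-step facts about pvTry
theorem pvTry_mono {pset : List (Int × Int)} {st : List (Int × Int) × List (Int × Int)}
    {n x : Int × Int} (h : x ∈ st.1) : x ∈ (pvTry pset st n).1 := by
  unfold pvTry; split <;> simp [h]

theorem pvTry_src {pset : List (Int × Int)} {st : List (Int × Int) × List (Int × Int)}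
    {n x : Int × Int} (h : x ∈ (pvTry pset st n).1) : x ∈ st.1 ∨ (x = n ∧ n ∈ pset) := by
  unfold pvTry at h
  split at h
  · next hc =>
    rcases List.mem_append.1 h with h | h
    · exact Or.inl h
    · exact Or.inr ⟨List.mem_singleton.1 h, hc.1⟩
  · exact Or.inl h

theorem pvTry_q_src {pset : List (Int × Int)} {st : List (Int × Int) × List (Int × Int)}
    {n x : Int × Int} (h : x ∈ (pvTry pset st n).2) : x ∈ st.2 ∨ x ∈ (pvTry pset st n).1 := by
  unfold pvTry at *
  split at h
  · rcases List.mem_append.1 h with h | h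
    · exact Or.inl h
    · right; simp_all
  · exact Or.inl h

theorem pvTry_q_mono {pset : List (Int × Int)} {st : List (Int × Int) × List (Int × Int)}
    {n x : Int × Int} (h : x ∈ st.2) : x ∈ (pvTry pset st n).2 := by
  unfold pvTry; split <;> simp [h]

theorem pvTry_new_q {pset : List (Int × Int)} {st : List (Int × Int) × List (Int × Int)}
    {n x : Int × Int} (h : x ∈ (pvTry pset st n).1) : x ∈ st.1 ∨ x ∈ (pvTry pset st n).2 := by
  unfold pvTry at *
  split at h
  · rcases List.mem_append.1 h with h | h
    · exact Or.inl h
    · right; simp_all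
  · exact Or.inl h

theorem pvTry_nodup {pset : List (Int × Int)} {st : List (Int × Int) × List (Int × Int)}
    {n : Int × Int} (h : st.1.Nodup) : (pvTry pset st n).1.Nodup := by
  unfold pvTry
  split
  · next hc =>
    refine List.Nodup.append h (List.nodup_singleton n) ?_
    intro x hx hn
    rw [List.mem_singleton] at hn
    subst hn
    exact hc.2 hx
  · exact h

theorem pvTry_adds {pset : List (Int × Int)} {st : List (Int × Int) × List (Int × Int)}
    {n : Int × Int} (h : n ∈ pset) : n ∈ (pvTry pset st n).1 := by
  unfold pvTry
  split
  · simp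
  · next hc =>
    have hn : n ∈ st.1 := by
      by_contra hn
      exact hc ⟨h, hn⟩
    exact hn

-- facts about the fold of pvTry over a direction list
theorem pvFoldT_mono (pset : List (Int × Int)) (r c : Int) :
    ∀ (ds : List (Int × Int)) (st : List (Int × Int) × List (Int × Int)) (x : Int × Int),
      x ∈ st.1 → x ∈ (ds.foldl (fun st d => pvTry pset st (r + d.1, c + d.2)) st).1 := by
  intro ds
  induction ds with
  | nil => intro st x h; exact h
  | cons d t ih => intro st x h; exact ih _ _ (pvTry_mono h)

theorem pvFoldT_src (pset : List (Int × Int)) (r c : Int) :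
    ∀ (ds : List (Int × Int)) (st : List (Int × Int) × List (Int × Int)) (x : Int × Int),
      x ∈ (ds.foldl (fun st d => pvTry pset st (r + d.1, c + d.2)) st).1 →
      x ∈ st.1 ∨ ∃ d ∈ ds, x = (r + d.1, c + d.2) ∧ x ∈ pset := by
  intro ds
  induction ds with
  | nil => intro st x h; exact Or.inl h
  | cons d t ih =>
    intro st x h
    rcases ih _ _ h with h | ⟨d', hd', hx⟩
    · rcases pvTry_src h with h | ⟨rfl, hn⟩
      · exact Or.inl h
      · exact Or.inr ⟨d, List.mem_cons_self .., ⟨rfl, hn⟩⟩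
    · exact Or.inr ⟨d', List.mem_cons_of_mem _ hd', hx⟩

theorem pvFoldT_q_mono (pset : List (Int × Int)) (r c : Int) :
    ∀ (ds : List (Int × Int)) (st : List (Int × Int) × List (Int × Int)) (x : Int × Int),
      x ∈ st.2 → x ∈ (ds.foldl (fun st d => pvTry pset st (r + d.1, c + d.2)) st).2 := by
  intro ds
  induction ds with
  | nil => intro st x h; exact h
  | cons d t ih => intro st x h; exact ih _ _ (pvTry_q_mono h)

theorem pvFoldT_q_src (pset : List (Int × Int)) (r c : Int) :
    ∀ (ds : List (Int × Int)) (st : List (Int × Int) × List (Int × Int)) (x : Int × Int),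
      x ∈ (ds.foldl (fun st d => pvTry pset st (r + d.1, c + d.2)) st).2 →
      x ∈ st.2 ∨ x ∈ (ds.foldl (fun st d => pvTry pset st (r + d.1, c + d.2)) st).1 := by
  intro ds
  induction ds with
  | nil => intro st x h; exact Or.inl h
  | cons d t ih =>
    intro st x h
    rcases ih _ _ h with h | h
    · rcases pvTry_q_src h with h | h
      · exact Or.inl h
      · exact Or.inr (pvFoldT_mono pset r c t _ x h)
    · exact Or.inr h

theorem pvFoldT_new_q (pset : List (Int × Int)) (r c : Int) :
    ∀ (ds : List (Int × Int)) (st : List (Int × Int) × List (Int × Int)) (x : Int × Int),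
      x ∈ (ds.foldl (fun st d => pvTry pset st (r + d.1, c + d.2)) st).1 →
      x ∈ st.1 ∨ x ∈ (ds.foldl (fun st d => pvTry pset st (r + d.1, c + d.2)) st).2 := by
  intro ds
  induction ds with
  | nil => intro st x h; exact Or.inl h
  | cons d t ih =>
    intro st x h
    rcases ih _ _ h with h | h
    · rcases pvTry_new_q h with h | h
      · exact Or.inl h
      · exact Or.inr (pvFoldT_q_mono pset r c t _ x h)
    · exact Or.inr h

theorem pvFoldT_nodup (pset : List (Int × Int)) (r c : Int) :
    ∀ (ds : List (Int × Int)) (st : List (Int × Int) × List (Int × Int)),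
      st.1.Nodup → (ds.foldl (fun st d => pvTry pset st (r + d.1, c + d.2)) st).1.Nodup := by
  intro ds
  induction ds with
  | nil => intro st h; exact h
  | cons d t ih => intro st h; exact ih _ (pvTry_nodup h)

theorem pvFoldT_adds (pset : List (Int × Int)) (r c : Int) :
    ∀ (ds : List (Int × Int)) (st : List (Int × Int) × List (Int × Int)) (d : Int × Int),
      d ∈ ds → (r + d.1, c + d.2) ∈ pset →
      (r + d.1, c + d.2) ∈ (ds.foldl (fun st d => pvTry pset st (r + d.1, c + d.2)) st).1 := by
  intro ds
  induction ds with
  | nil => intro st d h; cases h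
  | cons d0 t ih =>
    intro st d hd hp
    rcases List.mem_cons.1 hd with rfl | hd
    · exact pvFoldT_mono pset r c t _ _ (pvTry_adds hp)
    · exact ih _ _ hd hp

theorem pvStep_inv (pset : List (Int × Int)) (s : Int × Int) (v q : List (Int × Int))
    (p : Int × Int) (h : pvInv pset s v (p :: q)) :
    pvInv pset s (pvStep pset v q p.1 p.2).1 (pvStep pset v q p.1 p.2).2 := by
  obtain ⟨h1, h2, h3, h4, h5, h6⟩ := h
  have hpv : p ∈ v := h2 p (List.mem_cons_self ..)
  unfold pvStep
  refine ⟨pvFoldT_nodup _ _ _ _ _ h1, ?_, ?_, ?_, ?_, ?_⟩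
  · intro x hx
    rcases pvFoldT_q_src pset p.1 p.2 pvDirs (v, q) x hx with hx2 | hx2
    · exact pvFoldT_mono _ _ _ _ _ _ (h2 x (List.mem_cons_of_mem _ hx2))
    · exact hx2
  · intro x hx
    rcases pvFoldT_src pset p.1 p.2 pvDirs (v, q) x hx with hx2 | ⟨d, _, rfl, hps⟩
    · exact h3 x hx2
    · exact hps
  · exact pvFoldT_mono _ _ _ _ _ _ h4
  · intro x hx
    rcases pvFoldT_src pset p.1 p.2 pvDirs (v, q) x hx with hx2 | ⟨d, hd, rfl, hps⟩
    · exact h5 x hx2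
    · exact pvReach.step (h5 p hpv) hps ⟨d, hd, rfl⟩
  · intro y hy hyq n hn hadj
    by_cases hyp : y = p
    · subst hyp
      obtain ⟨d, hd, rfl⟩ := hadj
      exact pvFoldT_adds pset y.1 y.2 pvDirs (v, q) d hd hn
    · rcases pvFoldT_new_q pset p.1 p.2 pvDirs (v, q) y hy with hyv | hyq2
      · have hynq : y ∉ p :: q := by
          intro hc
          rcases List.mem_cons.1 hc with hc | hc
          · exact hyp hc
          · exact hyq (pvFoldT_q_mono pset p.1 p.2 pvDirs (v, q) y hc)
        exact pvFoldT_mono _ _ _ _ _ _ (h6 y hyv hynq n hn hadj)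
      · exact absurd hyq2 hyq

theorem pvBFS_spec (pset : List (Int × Int)) (s : Int × Int) :
    ∀ v q, pvInv pset s v q →
      (pvBFS pset v q).Nodup ∧ (∀ x, x ∈ pvBFS pset v q ↔ pvReach pset s x) := by
  intro v q
  induction v, q using pvBFS.induct pset with
  | case1 v =>
    intro h
    obtain ⟨h1, _, _, h4, h5, h6⟩ := h
    rw [pvBFS]
    refine ⟨h1, fun x => ⟨h5 x, ?_⟩⟩
    exact fun hr => pvReach_subset_closed (fun p hp => h6 p hp (List.not_mem_nil)) h4 x hr
  | case2 v p q st ih =>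
    intro h
    rw [pvBFS]
    exact ih (pvStep_inv pset s v q p h)

-- ---------- B side: saturation empties `remaining` iff everything is reachable ----------

def pvSatInv (pset : List (Int × Int)) (s : Int × Int) (C R : List (Int × Int)) : Prop :=
  C.Nodup ∧ R.Nodup ∧ (∀ x ∈ C, pvReach pset s x) ∧ (∀ x ∈ C, x ∈ pset) ∧
  (∀ x ∈ R, x ∈ pset) ∧ (∀ x ∈ R, x ∉ C) ∧ s ∈ C ∧ (∀ x ∈ pset, x ∈ C ∨ x ∈ R)

theorem pvCond_iff (c : List (Int × Int)) (p : Int × Int) :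
    ((p.1 - 1, p.2) ∈ c ∨ (p.1 + 1, p.2) ∈ c ∨ (p.1, p.2 - 1) ∈ c ∨ (p.1, p.2 + 1) ∈ c) ↔
      ∃ q ∈ c, pvAdj p q := by
  constructor
  · rintro (h | h | h | h)
    · exact ⟨_, h, (pvAdj_elts _ _).mpr (Or.inl rfl)⟩
    · exact ⟨_, h, (pvAdj_elts _ _).mpr (Or.inr (Or.inl rfl))⟩
    · exact ⟨_, h, (pvAdj_elts _ _).mpr (Or.inr (Or.inr (Or.inl rfl)))⟩
    · exact ⟨_, h, (pvAdj_elts _ _).mpr (Or.inr (Or.inr (Or.inr rfl)))⟩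
  · rintro ⟨q, hq, hadj⟩
    rw [pvAdj_elts] at hadj
    rcases hadj with rfl | rfl | rfl | rfl <;> tauto

theorem pvPassF_comp_mono :
    ∀ (l : List (Int × Int)) (c : List (Int × Int)) (b : Bool) (acc : List (Int × Int))
      (x : Int × Int), x ∈ c → x ∈ (l.foldl pvPassStep (c, b, acc)).1 := by
  intro l
  induction l with
  | nil => intro c b acc x h; exact h
  | cons p t ih =>
    intro c b acc x h
    simp only [List.foldl_cons, pvPassStep]
    split
    · exact ih _ _ _ _ ((PySem.Set.mem_add _ _ _).mpr (Or.inl h))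
    · exact ih _ _ _ _ h

theorem pvPassF_comp_src :
    ∀ (l : List (Int × Int)) (c : List (Int × Int)) (b : Bool) (acc : List (Int × Int))
      (x : Int × Int), x ∈ (l.foldl pvPassStep (c, b, acc)).1 → x ∈ c ∨ x ∈ l := by
  intro l
  induction l with
  | nil => intro c b acc x h; exact Or.inl h
  | cons p t ih =>
    intro c b acc x h
    simp only [List.foldl_cons, pvPassStep] at h
    split at h
    · rcases ih _ _ _ _ h with h | h
      · rcases (PySem.Set.mem_add _ _ _).mp h with h | rfl
        · exact Or.inl h
        · exact Or.inr (List.mem_cons_self ..)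
      · exact Or.inr (List.mem_cons_of_mem _ h)
    · rcases ih _ _ _ _ h with h | h
      · exact Or.inl h
      · exact Or.inr (List.mem_cons_of_mem _ h)

theorem pvPassF_acc_mono :
    ∀ (l : List (Int × Int)) (c : List (Int × Int)) (b : Bool) (acc : List (Int × Int))
      (x : Int × Int), x ∈ acc → x ∈ (l.foldl pvPassStep (c, b, acc)).2.2 := by
  intro l
  induction l with
  | nil => intro c b acc x h; exact h
  | cons p t ih =>
    intro c b acc x h
    simp only [List.foldl_cons, pvPassStep]
    split
    · exact ih _ _ _ _ h
    · exact ih _ _ _ _ (List.mem_append_left _ h)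

theorem pvPassF_acc_src :
    ∀ (l : List (Int × Int)) (c : List (Int × Int)) (b : Bool) (acc : List (Int × Int))
      (x : Int × Int), x ∈ (l.foldl pvPassStep (c, b, acc)).2.2 → x ∈ acc ∨ x ∈ l := by
  intro l
  induction l with
  | nil => intro c b acc x h; exact Or.inl h
  | cons p t ih =>
    intro c b acc x h
    simp only [List.foldl_cons, pvPassStep] at h
    split at h
    · rcases ih _ _ _ _ h with h | h
      · exact Or.inl h
      · exact Or.inr (List.mem_cons_of_mem _ h)
    · rcases ih _ _ _ _ h with h | h
      · rcases List.mem_append.1 h with h | h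
        · exact Or.inl h
        · exact Or.inr (by simpa using Or.inl (List.mem_singleton.1 h))
      · exact Or.inr (List.mem_cons_of_mem _ h)

theorem pvPassF_cover :
    ∀ (l : List (Int × Int)) (c : List (Int × Int)) (b : Bool) (acc : List (Int × Int))
      (x : Int × Int), x ∈ l →
      x ∈ (l.foldl pvPassStep (c, b, acc)).1 ∨ x ∈ (l.foldl pvPassStep (c, b, acc)).2.2 := by
  intro l
  induction l with
  | nil => intro c b acc x h; cases h
  | cons p t ih =>
    intro c b acc x h
    simp only [List.foldl_cons, pvPassStep]
    rcases List.mem_cons.1 h with rfl | h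
    · split
      · exact Or.inl (pvPassF_comp_mono _ _ _ _ _ ((PySem.Set.mem_add _ _ _).mpr (Or.inr rfl)))
      · exact Or.inr (pvPassF_acc_mono _ _ _ _ _ (List.mem_append_right _ (List.mem_singleton.2 rfl)))
    · split
      · exact ih _ _ _ _ h
      · exact ih _ _ _ _ h

theorem pvPassF_reach (pset : List (Int × Int)) (s : Int × Int) :
    ∀ (l : List (Int × Int)) (c : List (Int × Int)) (b : Bool) (acc : List (Int × Int)),
      (∀ y ∈ c, pvReach pset s y) → (∀ y ∈ l, y ∈ pset) →
      ∀ y ∈ (l.foldl pvPassStep (c, b, acc)).1, pvReach pset s y := by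
  intro l
  induction l with
  | nil => intro c b acc hc _ y hy; exact hc y hy
  | cons p t ih =>
    intro c b acc hc hl y hy
    simp only [List.foldl_cons, pvPassStep] at hy
    split at hy
    · next hcond =>
      refine ih _ _ _ ?_ (fun y hy => hl y (List.mem_cons_of_mem _ hy)) y hy
      intro z hz
      rcases (PySem.Set.mem_add _ _ _).mp hz with hz | rfl
      · exact hc z hz
      · obtain ⟨q, hq, hadj⟩ := (pvCond_iff c z).mp hcond
        exact pvReach.step (hc q hq) (hl z (List.mem_cons_self ..)) (pvAdj_symm hadj)
    · exact ih _ _ _ hc (fun y hy => hl y (List.mem_cons_of_mem _ hy)) y hy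

theorem pvPassF_comp_nodup :
    ∀ (l : List (Int × Int)) (c : List (Int × Int)) (b : Bool) (acc : List (Int × Int)),
      c.Nodup → (l.foldl pvPassStep (c, b, acc)).1.Nodup := by
  intro l
  induction l with
  | nil => intro c b acc h; exact h
  | cons p t ih =>
    intro c b acc h
    simp only [List.foldl_cons, pvPassStep]
    split
    · exact ih _ _ _ (PySem.Set.nodup_add c p h)
    · exact ih _ _ _ h

theorem pvPassF_acc_disj :
    ∀ (l : List (Int × Int)) (c : List (Int × Int)) (b : Bool) (acc : List (Int × Int)),
      l.Nodup → acc.Nodup → (∀ x ∈ acc, x ∉ c) → (∀ x ∈ acc, x ∉ l) → (∀ x ∈ l, x ∉ c) →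
      (l.foldl pvPassStep (c, b, acc)).2.2.Nodup ∧
        ∀ x ∈ (l.foldl pvPassStep (c, b, acc)).2.2, x ∉ (l.foldl pvPassStep (c, b, acc)).1 := by
  intro l
  induction l with
  | nil => intro c b acc _ h2 h3 _ _; exact ⟨h2, fun x hx => h3 x hx⟩
  | cons p t ih =>
    intro c b acc h1 h2 h3 h4 h5
    have hpt : p ∉ t := (List.nodup_cons.1 h1).1
    have ht : t.Nodup := (List.nodup_cons.1 h1).2
    simp only [List.foldl_cons, pvPassStep]
    split
    · refine ih _ _ _ ht h2 ?_ ?_ ?_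
      · intro x hx hc
        rcases (PySem.Set.mem_add _ _ _).mp hc with hc | rfl
        · exact h3 x hx hc
        · exact h4 x hx (List.mem_cons_self ..)
      · exact fun x hx => fun hxt => h4 x hx (List.mem_cons_of_mem _ hxt)
      · intro x hx hc
        rcases (PySem.Set.mem_add _ _ _).mp hc with hc | rfl
        · exact h5 x (List.mem_cons_of_mem _ hx) hc
        · exact hpt hx
    · refine ih _ _ _ ht ?_ ?_ ?_ ?_
      · refine List.Nodup.append h2 (List.nodup_singleton p) ?_
        intro x hx hp
        rw [List.mem_singleton] at hp
        subst hp
        exact h4 x hx (List.mem_cons_self ..)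
      · intro x hx
        rcases List.mem_append.1 hx with hx | hx
        · exact h3 x hx
        · rw [List.mem_singleton] at hx; subst hx
          exact h5 x (List.mem_cons_self ..)
      · intro x hx
        rcases List.mem_append.1 hx with hx | hx
        · exact fun hxt => h4 x hx (List.mem_cons_of_mem _ hxt)
        · rw [List.mem_singleton] at hx; subst hx
          exact hpt
      · exact fun x hx => h5 x (List.mem_cons_of_mem _ hx)

theorem pvPassF_flag_true :
    ∀ (l : List (Int × Int)) (c : List (Int × Int)) (acc : List (Int × Int)),
      (l.foldl pvPassStep (c, true, acc)).2.1 = true := by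
  intro l
  induction l with
  | nil => intro c acc; rfl
  | cons p t ih =>
    intro c acc
    simp only [List.foldl_cons, pvPassStep]
    split
    · exact ih _ _
    · exact ih _ _

theorem pvPassF_fixpoint :
    ∀ (l : List (Int × Int)) (c : List (Int × Int)) (acc : List (Int × Int)),
      (l.foldl pvPassStep (c, false, acc)).2.1 = false →
      (l.foldl pvPassStep (c, false, acc)).1 = c ∧
        (l.foldl pvPassStep (c, false, acc)).2.2 = acc ++ l ∧
        ∀ p ∈ l, ¬∃ q ∈ c, pvAdj p q := by
  intro l
  induction l with
  | nil => intro c acc _; exact ⟨rfl, by simp, by simp⟩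
  | cons p t ih =>
    intro c acc h
    simp only [List.foldl_cons, pvPassStep] at *
    by_cases hcond : (p.1 - 1, p.2) ∈ c ∨ (p.1 + 1, p.2) ∈ c ∨ (p.1, p.2 - 1) ∈ c ∨ (p.1, p.2 + 1) ∈ c
    · rw [if_pos hcond] at h
      rw [pvPassF_flag_true] at h
      cases h
    · rw [if_neg hcond] at h ⊢
      obtain ⟨e1, e2, e3⟩ := ih _ _ h
      refine ⟨e1, by simpa using e2, ?_⟩
      intro x hx
      rcases List.mem_cons.1 hx with rfl | hx
      · exact fun hex => hcond ((pvCond_iff c x).mpr hex)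
      · exact e3 x hx

theorem pvSat_spec_aux (pset : List (Int × Int)) (s : Int × Int) :
    ∀ (n : Nat) (C R : List (Int × Int)), R.length ≤ n → pvSatInv pset s C R →
      (pvSat C R = [] ↔ ∀ x ∈ pset, pvReach pset s x) := by
  intro n
  induction n with
  | zero =>
    intro C R hlen h
    obtain ⟨h1, h2, h3, h4, h5, h6, h7, h8⟩ := h
    have hR : R = [] := List.eq_nil_of_length_eq_zero (Nat.le_zero.1 hlen)
    subst hR
    rw [pvSat]
    simp only [pvPass, List.foldl_nil]
    rw [if_neg (by simp)]
    simp only [true_iff]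
    intro x hx
    rcases h8 x hx with hx | hx
    · exact h3 x hx
    · cases hx
  | succ n ih =>
    intro C R hlen h
    obtain ⟨h1, h2, h3, h4, h5, h6, h7, h8⟩ := h
    rw [pvSat]
    simp only [pvPass]
    by_cases hflag : (R.foldl pvPassStep (C, false, [])).2.1 = true
    · rw [if_pos hflag]
      have hlt := pvPass_len_lt R C [] hflag
      simp only [List.length_nil, Nat.zero_add] at hlt
      refine ih _ _ (by omega) ⟨?_, ?_, ?_, ?_, ?_, ?_, ?_, ?_⟩
      · exact pvPassF_comp_nodup R C false [] h1
      · exact (pvPassF_acc_disj R C false [] h2 (List.nodup_nil) (by simp) (by simp) h6).1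
      · exact pvPassF_reach pset s R C false [] h3 h5
      · intro x hx
        rcases pvPassF_comp_src R C false [] x hx with hx | hx
        · exact h4 x hx
        · exact h5 x hx
      · intro x hx
        rcases pvPassF_acc_src R C false [] x hx with hx | hx
        · cases hx
        · exact h5 x hx
      · exact fun x hx => (pvPassF_acc_disj R C false [] h2 (List.nodup_nil) (by simp) (by simp) h6).2 x hx
      · exact pvPassF_comp_mono R C false [] s h7
      · intro x hx
        rcases h8 x hx with hx2 | hx2
        · exact Or.inl (pvPassF_comp_mono R C false [] x hx2)
        · exact pvPassF_cover R C false [] x hx2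
    · rw [if_neg hflag]
      have hflag2 : (R.foldl pvPassStep (C, false, [])).2.1 = false := by
        simpa using hflag
      obtain ⟨e1, e2, e3⟩ := pvPassF_fixpoint R C [] hflag2
      rw [show (R.foldl pvPassStep (C, false, [])).2.2 = R by simpa using e2]
      constructor
      · rintro rfl
        intro x hx
        rcases h8 x hx with hx | hx
        · exact h3 x hx
        · cases hx
      · intro hall
        have hclosed : ∀ p ∈ C, ∀ m ∈ pset, pvAdj p m → m ∈ C := by
          intro p hp m hm hadj
          rcases h8 m hm with hm2 | hm2
          · exact hm2
          · exact absurd ⟨p, hp, pvAdj_symm hadj⟩ (e3 m hm2)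
        rw [List.eq_nil_iff_forall_not_mem]
        intro x hx
        exact h6 x hx (pvReach_subset_closed hclosed h7 x (hall x (h5 x hx)))

theorem pvSat_spec (pset : List (Int × Int)) (s : Int × Int) (C R : List (Int × Int))
    (h : pvSatInv pset s C R) :
    (pvSat C R = [] ↔ ∀ x ∈ pset, pvReach pset s x) :=
  pvSat_spec_aux pset s R.length C R (le_refl _) h

-- ---------- the collected positions are distinct ----------

theorem pvPositions_eq (board : List (List (List (String × List (String × Int))))) (pid : Int) :
    pvPositions board pid =
      (PySem.List.enumerate board 0).flatMap (fun rp =>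
        ((PySem.List.enumerate rp.2 0).filter (fun cp => pvIsPlayer cp.2 pid)).map
          (fun cp => (rp.1, cp.1))) := by
  unfold pvPositions
  have hinner : ∀ (rp : Int × List (List (String × List (String × Int)))) (acc : List (Int × Int)),
      (PySem.List.enumerate rp.2 0).foldl
          (fun acc2 cp => if pvIsPlayer cp.2 pid then acc2 ++ [(rp.1, cp.1)] else acc2) acc
        = acc ++ ((PySem.List.enumerate rp.2 0).filter (fun cp => pvIsPlayer cp.2 pid)).map
            (fun cp => (rp.1, cp.1)) := by
    intro rp acc
    exact PySem.List.foldl_append_if _ _ _ _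
  simp only [hinner]
  rw [PySem.List.foldl_append_eq_flatMap]
  simp

theorem pvPositions_nodup (board : List (List (List (String × List (String × Int))))) (pid : Int) :
    (pvPositions board pid).Nodup := by
  rw [pvPositions_eq, List.nodup_flatMap]
  constructor
  · intro rp _
    have hp : ((PySem.List.enumerate rp.2 0).filter
        (fun cp => pvIsPlayer cp.2 pid)).Pairwise (fun p q => p.1 < q.1) :=
      List.Pairwise.filter _ (PySem.List.pairwise_lt_enumerate rp.2 0)
    refine List.Pairwise.map _ ?_ hp
    intro a b hab he
    rw [Prod.ext_iff] at he
    simp only at he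
    omega
  · have hp := PySem.List.pairwise_lt_enumerate board 0
    refine hp.imp ?_
    intro rp rq hlt x hx1 hx2
    simp only [List.mem_map, List.mem_filter] at hx1 hx2
    obtain ⟨a, _, rfl⟩ := hx1
    obtain ⟨b, _, hb⟩ := hx2
    rw [Prod.ext_iff] at hb
    simp only at hb
    omega

-- ===== VERDICT (by name: the statement is the Claim_ definition above) =====
theorem evaluate_all_connected_py_spec : Claim_equal_evaluate_all_connected_py := by
  intro board pid bonus _
  unfold Spec_evaluate_all_connected_py
  have hnd := pvPositions_nodup board pid
  simp only [evaluate_all_connected_py, evaluate_all_connected_py_alt]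
  generalize hpv : pvPositions board pid = pps at hnd ⊢
  by_cases hlen : pps.length ≤ 1
  · simp only [if_pos hlen]
  · simp only [if_neg hlen]
    cases pps with
    | nil => rfl
    | cons p0 rest =>
      have hs : p0 ∈ p0 :: rest := List.mem_cons_self ..
      have hset : PySem.Set.ofList (p0 :: rest) = p0 :: rest :=
        PySem.Set.ofList_eq_self_of_nodup _ hnd
      rw [hset]
      change (if (pvBFS (p0 :: rest) [p0] [p0]).length = (p0 :: rest).length then bonus else 0)
        = if (pvSat [p0] (List.filter (fun p => decide (p ≠ p0)) (p0 :: rest))).isEmpty = true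
          then bonus else 0
      -- A side: the BFS visits exactly the reachable positions
      have hAinv : pvInv (p0 :: rest) p0 [p0] [p0] := by
        refine ⟨List.nodup_singleton _, ?_, ?_, List.mem_singleton.2 rfl, ?_, ?_⟩
        · intro x hx; exact hx
        · intro x hx
          rw [List.mem_singleton] at hx
          subst hx
          exact hs
        · intro x hx
          rw [List.mem_singleton] at hx
          subst hx
          exact pvReach.base
        · intro p hp hpq
          exact absurd hp hpq
      obtain ⟨hVnd, hVmem⟩ := pvBFS_spec (p0 :: rest) p0 [p0] [p0] hAinv
      -- B side: the saturation empties `remaining` iff everything is reachable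
      have hBinv : pvSatInv (p0 :: rest) p0 [p0]
          ((p0 :: rest).filter (fun p => decide (p ≠ p0))) := by
        refine ⟨List.nodup_singleton _, List.Nodup.filter _ hnd, ?_, ?_, ?_, ?_,
          List.mem_singleton.2 rfl, ?_⟩
        · intro x hx
          rw [List.mem_singleton] at hx
          subst hx
          exact pvReach.base
        · intro x hx
          rw [List.mem_singleton] at hx
          subst hx
          exact hs
        · intro x hx
          exact (List.mem_filter.1 hx).1
        · intro x hx
          have := (List.mem_filter.1 hx).2
          rw [List.mem_singleton]
          simpa using this
        · intro x hx
          by_cases hx0 : x = p0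
          · exact Or.inl (List.mem_singleton.2 hx0)
          · exact Or.inr (List.mem_filter.2 ⟨hx, by simpa using hx0⟩)
      have hB := pvSat_spec (p0 :: rest) p0 [p0]
        ((p0 :: rest).filter (fun p => decide (p ≠ p0))) hBinv
      by_cases hr : ∀ x ∈ (p0 :: rest), pvReach (p0 :: rest) p0 x
      · -- connected: both return bonus
        have hVp : (pvBFS (p0 :: rest) [p0] [p0]).Perm (p0 :: rest) := by
          rw [List.perm_ext_iff_of_nodup hVnd hnd]
          intro x
          constructor
          · intro hx
            exact pvReach_mem hs ((hVmem x).1 hx)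
          · intro hx
            exact (hVmem x).2 (hr x hx)
        rw [if_pos hVp.length_eq, if_pos (List.isEmpty_iff.2 (hB.2 hr))]
      · -- disconnected: both return 0
        have hA0 : ¬ (pvBFS (p0 :: rest) [p0] [p0]).length = (p0 :: rest).length := by
          intro hleq
          apply hr
          have hsub : pvBFS (p0 :: rest) [p0] [p0] ⊆ p0 :: rest := by
            intro x hx
            exact pvReach_mem hs ((hVmem x).1 hx)
          have hperm := (List.subperm_of_subset hVnd hsub).perm_of_length_le (le_of_eq hleq.symm)
          intro x hx
          exact (hVmem x).1 (hperm.mem_iff.2 hx)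
        have hB0 : ¬ (pvSat [p0] ((p0 :: rest).filter (fun p => decide (p ≠ p0)))).isEmpty = true := by
          rw [List.isEmpty_iff]
          intro he
          exact hr (hB.1 he)
        rw [if_neg hA0, if_neg hB0]
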